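-- pv_equiv track=rewrite | github.com/xfrnk2/archived-prev-1d1c-repo | programmers/common_square.py | solution
-- ===== SOURCE A (Python) =====
-- def solution(w, h):
--     x = 0
--     f = 2*w - h
--     df1 = 2* w
--     df2 = 2*(w-h)
--     stack = []
--     for y in range(h):
--         stack.append((x, y))
--         if f < 0:
--             f += df1
--         else:
--             x += 1
--             f += df2
--     return stack
-- ===== SOURCE B (Python) =====
-- def solution(w, h):
--     # Closed form: no error accumulator; each x derived directly from y
--     # (Bresenham midpoint formula, clamped to [0, y]).
--     return [(max(0, min(y, (2 * w * y + h) // (2 * h))), y) for y in range(h)]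
-- ===== Notes on version B (the rewrite author's own statement) =====
-- stated objective: alternative
-- what changed: Replaces the stateful per-iteration Bresenham error accumulation with a stateless list comprehension computing each x directly by the clamped closed-form floor formula max(0, min(y, (2*w*y + h)//(2*h))).
import Mathlib
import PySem

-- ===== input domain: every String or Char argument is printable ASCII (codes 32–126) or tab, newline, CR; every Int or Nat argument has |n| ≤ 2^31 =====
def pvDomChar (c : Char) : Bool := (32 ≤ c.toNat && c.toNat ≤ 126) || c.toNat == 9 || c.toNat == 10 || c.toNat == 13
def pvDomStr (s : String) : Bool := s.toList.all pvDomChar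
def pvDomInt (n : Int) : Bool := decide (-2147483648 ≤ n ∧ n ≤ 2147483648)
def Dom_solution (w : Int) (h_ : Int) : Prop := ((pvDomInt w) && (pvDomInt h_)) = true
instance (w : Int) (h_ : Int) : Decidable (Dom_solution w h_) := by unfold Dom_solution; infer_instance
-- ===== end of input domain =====

-- B replaces A's stateful Bresenham error accumulation by a stateless closed-form
-- per-y formula (clamped midpoint floor division); same O(h) cost, different algorithm.

-- ===== PORT A =====
-- state is (x, f, stack); each range step appends (x, y) then updates x and f
def solution (w : Int) (h_ : Int) : List (Int × Int) :=
  let df1 := 2 * w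
  let df2 := 2 * (w - h_)
  let st := (PySem.List.pyRange 0 h_ 1).foldl
    (fun (s : Int × Int × List (Int × Int)) y =>
      let stack' := s.2.2 ++ [(s.1, y)]
      if s.2.1 < 0 then (s.1, s.2.1 + df1, stack')
      else (s.1 + 1, s.2.1 + df2, stack'))
    (0, 2 * w - h_, [])
  st.2.2

-- ===== PORT B =====
def solution_alt (w : Int) (h_ : Int) : List (Int × Int) :=
  (PySem.List.pyRange 0 h_ 1).map
    (fun y => (max 0 (min y (PySem.Int.floordiv (2 * w * y + h_) (2 * h_))), y))

-- ===== PRECONDITION & SPEC =====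
def Spec_solution (w : Int) (h_ : Int) (out : List (Int × Int)) : Prop := out = solution_alt w h_
instance (w : Int) (h_ : Int) (out : List (Int × Int)) : Decidable (Spec_solution w h_ out) := by unfold Spec_solution; infer_instance

-- ===== CLAIM (what is proved, stated in full; the proofs are below) =====
def Claim_equal_solution : Prop := ∀ (w : Int) (h_ : Int), Dom_solution w h_ → Spec_solution w h_ (solution w h_)

-- ===== LEMMAS AND PROOFS =====

-- the closed-form x for row y
def pvX (w h y : Int) : Int := max 0 (min y (PySem.Int.floordiv (2 * w * y + h) (2 * h)))

-- one A-step advances the closed form by the same 0/1 increment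
lemma pvX_step (w h n : Int) (hh : 0 < h) (hn : 0 ≤ n) :
    pvX w h (n + 1) =
      if 2 * w * (n + 1) - h - 2 * h * (pvX w h n) < 0 then pvX w h n else pvX w h n + 1 := by
  have hb : (0 : Int) < 2 * h := by omega
  unfold pvX
  set q := PySem.Int.floordiv (2 * w * n + h) (2 * h) with hqdef
  set q' := PySem.Int.floordiv (2 * w * (n + 1) + h) (2 * h) with hq'def
  obtain ⟨hq1, hq2⟩ : q * (2 * h) ≤ 2 * w * n + h ∧ 2 * w * n + h < (q + 1) * (2 * h) :=
    (PySem.Int.floordiv_eq_iff_of_pos hb).mp hqdef.symm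
  obtain ⟨hp1, hp2⟩ :
      q' * (2 * h) ≤ 2 * w * (n + 1) + h ∧ 2 * w * (n + 1) + h < (q' + 1) * (2 * h) :=
    (PySem.Int.floordiv_eq_iff_of_pos hb).mp hq'def.symm
  rcases (by omega : q ≤ 0 ∨ (0 < q ∧ q < n) ∨ (0 < q ∧ n ≤ q)) with hA | ⟨hB, hBn⟩ | ⟨hC, hCn⟩
  · -- x = 0 so far
    have hX : max 0 (min n q) = 0 := by omega
    rw [hX]
    rcases (by omega : q' ≤ 0 ∨ 1 ≤ q') with h0 | h1
    · rw [if_pos (by nlinarith [mul_nonneg (by omega : (0:Int) ≤ -q') (by omega : (0:Int) ≤ 2*h)])]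
      omega
    · rw [if_neg (by simp only [not_lt]; nlinarith [mul_nonneg (by omega : (0:Int) ≤ q' - 1) (by omega : (0:Int) ≤ 2*h)])]
      rcases (by omega : q' ≤ 1 ∨ 2 ≤ q') with h2 | h2
      · omega
      · rcases (by omega : n = 0 ∨ 1 ≤ n) with rfl | h3
        · omega
        · exfalso
          have e1 : 2 * w * n < h := by
            nlinarith [mul_nonneg (by omega : (0:Int) ≤ -q) (by omega : (0:Int) ≤ 2*h)]
          have e2 : 2 * h ≤ 2 * w := by
            nlinarith [mul_nonneg (by omega : (0:Int) ≤ q' - 2) (by omega : (0:Int) ≤ 2*h)]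
          have e3 : 2 * w ≤ 2 * w * n := by
            nlinarith [mul_nonneg (by omega : (0:Int) ≤ n - 1) (by omega : (0:Int) ≤ 2*w)]
          omega
  · -- strictly inside: x = q
    have hX : max 0 (min n q) = q := by omega
    rw [hX]
    have hw : 0 < w := by
      rcases (by omega : 0 < w ∨ w ≤ 0) with h' | h'
      · exact h'
      · exfalso
        nlinarith [mul_nonneg (by omega : (0:Int) ≤ q - 1) (by omega : (0:Int) ≤ 2*h),
                   mul_nonneg (by omega : (0:Int) ≤ -(2*w)) (by omega : (0:Int) ≤ n)]
    rcases (by omega : q' ≤ q ∨ q + 1 ≤ q') with h0 | h1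
    · rw [if_pos (by nlinarith [mul_nonneg (by omega : (0:Int) ≤ q - q') (by omega : (0:Int) ≤ 2*h)])]
      have : q' = q := by
        rcases (by omega : q' = q ∨ q' ≤ q - 1) with h' | h'
        · exact h'
        · exfalso
          nlinarith [mul_nonneg (by omega : (0:Int) ≤ q - 1 - q') (by omega : (0:Int) ≤ 2*h)]
      omega
    · rw [if_neg (by simp only [not_lt]; nlinarith [mul_nonneg (by omega : (0:Int) ≤ q' - (q+1)) (by omega : (0:Int) ≤ 2*h)])]
      have : q' = q + 1 := by
        rcases (by omega : q' = q + 1 ∨ q + 2 ≤ q') with h' | h'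
        · exact h'
        · exfalso
          have e1 : 2 * h < 2 * w := by
            nlinarith [mul_nonneg (by omega : (0:Int) ≤ q' - (q+2)) (by omega : (0:Int) ≤ 2*h)]
          nlinarith [mul_nonneg (by omega : (0:Int) ≤ n - (q+1)) (by omega : (0:Int) ≤ 2*h),
                     mul_nonneg (by omega : (0:Int) ≤ 2*w - 2*h) (by omega : (0:Int) ≤ n)]
      omega
  · -- saturated: x = n
    have hX : max 0 (min n q) = n := by omega
    rw [hX]
    rcases (by omega : q' ≤ n ∨ n + 1 ≤ q') with h0 | h1
    · rw [if_pos (by nlinarith [mul_nonneg (by omega : (0:Int) ≤ n - q') (by omega : (0:Int) ≤ 2*h)])]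
      rcases (by omega : n = 0 ∨ 1 ≤ n) with rfl | h2
      · omega
      · have : q' = n := by
          rcases (by omega : q' = n ∨ q' ≤ n - 1) with h' | h'
          · exact h'
          · exfalso
            have e1 : n * (2 * h) ≤ 2 * w * n + h := by
              nlinarith [mul_nonneg (by omega : (0:Int) ≤ q - n) (by omega : (0:Int) ≤ 2*h)]
            have e2 : 0 < 2 * w := by nlinarith [mul_nonneg (by omega : (0:Int) ≤ n - 1) (by omega : (0:Int) ≤ 2*h)]
            nlinarith [mul_nonneg (by omega : (0:Int) ≤ n - 1 - q') (by omega : (0:Int) ≤ 2*h)]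
        omega
    · rw [if_neg (by simp only [not_lt]; nlinarith [mul_nonneg (by omega : (0:Int) ≤ q' - (n+1)) (by omega : (0:Int) ≤ 2*h)])]
      omega

lemma pvX_zero (w h : Int) : pvX w h 0 = 0 := by
  unfold pvX; omega

-- proof-side view of the integer range
def pvRg (n : Nat) : List Int := (List.range n).map Int.ofNat

lemma pvRg_succ (n : Nat) : pvRg (n + 1) = pvRg n ++ [Int.ofNat n] := by
  unfold pvRg; rw [List.range_succ]; simp

-- A's loop invariant over the first n rows
lemma loopA (w h : Int) (hh : 0 < h) (n : Nat) :
    (pvRg n).foldl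
      (fun (s : Int × Int × List (Int × Int)) y =>
        let stack' := s.2.2 ++ [(s.1, y)]
        if s.2.1 < 0 then (s.1, s.2.1 + 2 * w, stack')
        else (s.1 + 1, s.2.1 + 2 * (w - h), stack'))
      (0, 2 * w - h, [])
    = (pvX w h n, 2 * w * ((n : Int) + 1) - h - 2 * h * (pvX w h n),
       (pvRg n).map (fun k => (pvX w h k, k))) := by
  induction n with
  | zero => simp [pvX_zero, pvRg]
  | succ m ih =>
      rw [pvRg_succ, List.foldl_append, ih, List.map_append]
      simp only [List.map_cons, List.map_nil, List.foldl_cons, List.foldl_nil, Prod.ext_iff]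
      have hstep := pvX_step w h (m : Int) hh (by positivity)
      push_cast
      by_cases hc : 2 * w * ((m : Int) + 1) - h - 2 * h * (pvX w h (m : Int)) < 0
      · simp only [if_pos hc] at hstep ⊢
        exact ⟨hstep.symm, by rw [hstep]; ring, rfl⟩
      · simp only [if_neg hc] at hstep ⊢
        exact ⟨hstep.symm, by rw [hstep]; ring, rfl⟩

-- ===== VERDICT (by name: the statement is the Claim_ definition above) =====
theorem solution_spec : Claim_equal_solution := by
  intro w h _
  unfold Spec_solution solution solution_alt
  rcases (by omega : h ≤ 0 ∨ 0 < h) with hle | hpos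
  · have he : PySem.List.pyRange 0 h 1 = [] := by
      rw [PySem.List.pyRange_one]
      have : (h - 0).toNat = 0 := by omega
      rw [this]; simp
    simp [he]
  · rw [PySem.List.pyRange_one]
    have hz : ∀ k : Nat, (0 : Int) + (k : Int) = (k : Int) := fun k => by ring
    simp only [hz, sub_zero]
    have he : List.map (fun k : Nat => ((k : Int))) (List.range h.toNat) = pvRg h.toNat := by
      simp [pvRg]
    rw [he, loopA w h hpos h.toNat]
    simp only [pvRg, List.map_map]
    rfl
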